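-- pv_equiv track=rewrite | github.com/williamzujkowski/dependency-risk-profiler | src/dependency_risk_profiler/supply_chain/analyzer.py | calculate_path_criticality
-- ===== SOURCE A (Python) =====
-- from typing import Dict, List, Set, Tuple
--
-- def calculate_path_criticality(
--     dependency: str, transitive_deps: Dict[str, Set[str]], visited: Set[str] = None
-- ) -> int:
--     """Calculate the criticality of a dependency based on its position in the dependency graph.
--
--     Args:
--         dependency: Name of the dependency to analyze.
--         transitive_deps: Dictionary mapping dependency names to their dependencies.
--         visited: Set of already visited dependencies to prevent cycles.
--
--     Returns:
--         Criticality score based on number of dependencies that rely on this one.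
--     """
--     if visited is None:
--         visited = set()
--
--     if dependency in visited:
--         return 0  # Prevent cycles
--
--     visited.add(dependency)
--
--     # Direct dependents count
--     dependent_count = 0
--
--     # Check which other packages depend on this one
--     for dep_name, deps in transitive_deps.items():
--         if dependency in deps and dep_name != dependency:
--             # Add 1 for this direct dependent
--             dependent_count += 1
--             # Add indirect dependents (recursively)
--             dependent_count += calculate_path_criticality(
--                 dep_name, transitive_deps, visited.copy()
--             )
--
--     return dependent_count
-- ===== SOURCE B (Python) =====
-- def calculate_path_criticality(dependency, transitive_deps, visited=None):
--     # Build the reverse-dependency (dependents) index once, then recurse over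
--     # actual dependents instead of rescanning the whole dict at every call.
--     # Unlike A, this does not mutate the caller's `visited` set.
--     edges = [
--         (dep, name)
--         for name, deps in transitive_deps.items()
--         for dep in deps
--         if name != dep
--     ]
--     dependents = {}
--     for dep, name in edges:
--         dependents.setdefault(dep, []).append(name)
--
--     def count(node, seen):
--         if node in seen:
--             return 0
--         seen = seen | {node}
--         total = 0
--         for parent in dependents.get(node, ()):
--             total += 1 + count(parent, seen)
--         return total
--
--     return count(dependency, visited if visited is not None else set())
-- ===== Notes on version B (the rewrite author's own statement) =====
-- stated objective: alternative
-- what changed: B precomputes a reverse-dependency index (dependent lists per package) once and the recursion walks only the actual dependents of each node, instead of rescanning the whole dict at every recursive call as A does; B does not mutate the caller's visited set.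
-- outside the precondition, e.g. on calculate_path_criticality('b', {'a': ['b', 'b']}, None): A returns 1, B returns 2
import Mathlib
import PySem

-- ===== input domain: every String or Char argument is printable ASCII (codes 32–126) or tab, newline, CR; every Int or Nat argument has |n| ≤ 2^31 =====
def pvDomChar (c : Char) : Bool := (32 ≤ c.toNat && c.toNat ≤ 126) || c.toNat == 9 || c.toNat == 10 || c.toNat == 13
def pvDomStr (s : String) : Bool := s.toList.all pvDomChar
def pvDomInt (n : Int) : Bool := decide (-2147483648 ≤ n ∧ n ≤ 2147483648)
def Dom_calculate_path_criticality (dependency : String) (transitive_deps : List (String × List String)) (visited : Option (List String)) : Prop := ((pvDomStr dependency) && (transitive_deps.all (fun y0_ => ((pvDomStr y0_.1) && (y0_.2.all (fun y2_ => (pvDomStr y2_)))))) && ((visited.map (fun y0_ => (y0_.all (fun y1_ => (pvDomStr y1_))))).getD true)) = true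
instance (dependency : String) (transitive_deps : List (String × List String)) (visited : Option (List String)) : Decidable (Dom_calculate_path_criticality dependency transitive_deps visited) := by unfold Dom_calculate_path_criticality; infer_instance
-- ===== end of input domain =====

-- B replaces A's whole-dict rescan per recursive call by a reverse-dependency index built once;
-- equivalence is about the RETURN value only (Python A mutates the caller's `visited`, B does not).

-- generic strict-decrease lemma used by both termination proofs
theorem pv_length_filter_lt {α : Type} (l : List α) (p q : α → Bool)
    (himp : ∀ x, q x = true → p x = true) (x : α) (hx : x ∈ l)
    (hpx : p x = true) (hqx : q x = false) :
    (l.filter q).length < (l.filter p).length := by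
  induction l with
  | nil => cases hx
  | cons a t ih =>
    rcases List.mem_cons.mp hx with rfl | hx'
    · have hq : t.filter q = (t.filter p).filter q := by
        rw [List.filter_filter]
        apply List.filter_congr
        intro y _
        cases hqy : q y
        · simp
        · simp [himp y hqy]
      have hle : (t.filter q).length ≤ (t.filter p).length := by
        rw [hq]; exact ((t.filter p).filter_sublist).length_le
      simp only [List.filter_cons, hpx, hqx]
      simp
      omega
    · have hrec := ih hx'
      simp only [List.filter_cons]
      cases hqa : q a <;> cases hpa : p a <;> simp_all <;> omega

-- ===== PORT A =====
-- pvLoopA is the body of A's `for dep_name, deps in transitive_deps.items()` loop, with A's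
-- recursive call (its `in visited` check and `visited.add`) inlined at the call site; the
-- proof argument `hrem` (rem is always a sub-collection of tds) only serves termination.
def pvLoopA (tds : List (String × List String)) (rem : List (String × List String))
    (dep : String) (V : List String) (hrem : ∀ kv ∈ rem, kv ∈ tds) : Int :=
  match rem with
  | [] => 0
  | (n, ds) :: rest =>
    (if ds.contains dep && n != dep then
       1 + (if hv : V.contains n then 0
            else pvLoopA tds tds n (n :: V) (fun _ h => h))
     else 0)
    + pvLoopA tds rest dep V (fun kv h => hrem kv (List.mem_cons_of_mem _ h))
termination_by ((tds.filter (fun kv => !V.contains kv.1)).length, rem.length)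
decreasing_by
  · apply Prod.Lex.left
    refine pv_length_filter_lt tds _ _ ?_ (n, ds) (hrem (n, ds) List.mem_cons_self) ?_ ?_
    · intro y hq
      simp only [Bool.not_eq_true', List.contains_cons, Bool.or_eq_false_iff] at hq
      simpa using hq.2
    · simpa using hv
    · simp
  · apply Prod.Lex.right
    simp

def calculate_path_criticality (dependency : String) (transitive_deps : List (String × List String)) (visited : Option (List String)) : Int :=
  let V := visited.getD []
  if V.contains dependency then 0
  else pvLoopA transitive_deps transitive_deps dependency (dependency :: V) (fun _ h => h)

-- ===== PORT B =====
-- edges = [(dep, name) for name, deps in transitive_deps.items() for dep in deps if name != dep]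
def pvEdges (tds : List (String × List String)) : List (String × String) :=
  tds.flatMap (fun kv => (kv.2.filter (fun d => kv.1 != d)).map (fun d => (d, kv.1)))

-- dependents = {}; for dep, name in edges: dependents.setdefault(dep, []).append(name)
def pvRev (edges : List (String × String)) : PySem.Dict String (List String) :=
  edges.foldl (fun r e => r.modify e.1 [] (· ++ [e.2])) PySem.Dict.empty

theorem pvRev_getD (edges : List (String × String)) (c : String) :
    (pvRev edges).getD c [] = (edges.filter (fun e => e.1 == c)).map (·.2) := by
  simpa using PySem.Dict.getD_foldl_modify_append edges PySem.Dict.empty c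

theorem pv_mem_rev_getD (edges : List (String × String)) (c x : String)
    (hx : x ∈ (pvRev edges).getD c []) : x ∈ edges.map (·.2) := by
  rw [pvRev_getD] at hx
  rcases List.mem_map.mp hx with ⟨e, he, rfl⟩
  exact List.mem_map.mpr ⟨e, (List.mem_filter.mp he).1, rfl⟩

-- pvLoopB is B's `for parent in dependents.get(node, ()):` loop with count's head
-- (membership check, seen ∪ {node}) inlined; h/hrev are termination-only proof arguments.
def pvLoopB (rev : PySem.Dict String (List String)) (E : List String)
    (ns : List String) (V : List String)
    (h : ∀ x ∈ ns, x ∈ E) (hrev : ∀ c x, x ∈ rev.getD c [] → x ∈ E) : Int :=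
  match ns with
  | [] => 0
  | n :: rest =>
    (1 + (if hv : V.contains n then 0
          else pvLoopB rev E (rev.getD n []) (n :: V) (fun x hx => hrev n x hx) hrev))
    + pvLoopB rev E rest V (fun x hx => h x (List.mem_cons_of_mem _ hx)) hrev
termination_by ((E.filter (fun x => !V.contains x)).length, ns.length)
decreasing_by
  · apply Prod.Lex.left
    refine pv_length_filter_lt E _ _ ?_ n (h n List.mem_cons_self) ?_ ?_
    · intro y hq
      simp only [Bool.not_eq_true', List.contains_cons, Bool.or_eq_false_iff] at hq
      simpa using hq.2
    · simpa using hv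
    · simp
  · apply Prod.Lex.right
    simp

def calculate_path_criticality_alt (dependency : String) (transitive_deps : List (String × List String)) (visited : Option (List String)) : Int :=
  let edges := pvEdges transitive_deps
  let rev := pvRev edges
  let V := visited.getD []
  if V.contains dependency then 0
  else pvLoopB rev (edges.map (·.2)) (rev.getD dependency []) (dependency :: V)
        (fun x hx => pv_mem_rev_getD edges dependency x hx)
        (fun c x hx => pv_mem_rev_getD edges c x hx)

-- ===== PRECONDITION & SPEC =====
-- Pre_ excludes dependency-value lists with duplicate entries: they do not represent Python
-- sets (A's `dependency in deps` counts an entry once, B's index records one edge per occurrence).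
def Pre_calculate_path_criticality (dependency : String) (transitive_deps : List (String × List String)) (visited : Option (List String)) : Prop :=
  ∀ kv ∈ transitive_deps, kv.2.Nodup
instance (dependency : String) (transitive_deps : List (String × List String)) (visited : Option (List String)) : Decidable (Pre_calculate_path_criticality dependency transitive_deps visited) := by unfold Pre_calculate_path_criticality; infer_instance

def pvWitness_calculate_path_criticality : String × (List (String × List String)) × Option (List String) :=
  ("a", [("b", ["a"]), ("c", ["a", "b"])], none)

def Spec_calculate_path_criticality (dependency : String) (transitive_deps : List (String × List String)) (visited : Option (List String)) (out : Int) : Prop := out = calculate_path_criticality_alt dependency transitive_deps visited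
instance (dependency : String) (transitive_deps : List (String × List String)) (visited : Option (List String)) (out : Int) : Decidable (Spec_calculate_path_criticality dependency transitive_deps visited out) := by unfold Spec_calculate_path_criticality; infer_instance

-- ===== CLAIM (what is proved, stated in full; the proofs are below) =====
def Claim_equal_calculate_path_criticality : Prop := ∀ (dependency : String) (transitive_deps : List (String × List String)) (visited : Option (List String)), Dom_calculate_path_criticality dependency transitive_deps visited → Pre_calculate_path_criticality dependency transitive_deps visited → Spec_calculate_path_criticality dependency transitive_deps visited (calculate_path_criticality dependency transitive_deps visited)

-- ===== LEMMAS AND PROOFS =====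

-- the dependents list of `dep` in B's index is exactly the (first components of the)
-- entries A's scan would pick up, in scan order — needs Nodup of each value set
theorem pv_filter_single (ds : List String) (n dep : String) (hnd : ds.Nodup) :
    ds.filter (fun d => d == dep && n != d) =
      if ds.contains dep && n != dep then [dep] else [] := by
  cases hc : ds.contains dep with
  | false =>
    simp only [hc, Bool.false_and, if_neg Bool.false_ne_true]
    rw [List.filter_eq_nil_iff]
    intro d hd
    cases hdd : d == dep
    · simp [hdd]
    · exfalso
      have hdd' : d = dep := by simpa using hdd
      subst hdd'
      simp at hc
      exact hc hd
  | true =>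
    cases hn : n != dep with
    | false =>
      have hne : n = dep := by simpa using hn
      simp only [Bool.and_false, if_neg Bool.false_ne_true]
      rw [List.filter_eq_nil_iff]
      intro d hd
      cases hdd : d == dep
      · simp [hdd]
      · have hdd' : d = dep := by simpa using hdd
        simp [hne, hdd']
    | true =>
      have hcg : ds.filter (fun d => d == dep && n != d) = ds.filter (fun d => d == dep) := by
        apply List.filter_congr
        intro d _
        cases hdd : d == dep
        · simp [hdd]
        · have hdd' : d = dep := by simpa using hdd
          subst hdd'
          simp_all
      have hmem : dep ∈ ds := by simpa using hc
      have hcnt : ds.count dep = 1 := List.count_eq_one_of_mem hnd hmem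
      rw [hcg, List.filter_beq, hcnt]
      simp [hc, hn]

theorem pv_head_part (ds : List String) (n dep : String) (hnd : ds.Nodup) :
    ((((ds.filter (fun d => n != d)).map (fun d => (d, n))).filter (fun e : String × String => e.1 == dep)).map (·.2)) =
      if ds.contains dep && n != dep then [n] else [] := by
  rw [List.filter_map, List.map_map, List.filter_filter]
  have hpred : (fun a => ((fun e : String × String => e.1 == dep) ∘ fun d => (d, n)) a && n != a)
      = (fun d => d == dep && n != d) := by
    funext d
    simp [Function.comp]
  rw [hpred, pv_filter_single ds n dep hnd]
  cases (ds.contains dep && n != dep) <;> simp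

theorem pv_rev_getD_eq (tds : List (String × List String))
    (hpre : ∀ kv ∈ tds, kv.2.Nodup) (dep : String) :
    (pvRev (pvEdges tds)).getD dep [] =
      (tds.filter (fun kv => kv.2.contains dep && kv.1 != dep)).map (·.1) := by
  rw [pvRev_getD]
  induction tds with
  | nil => simp [pvEdges]
  | cons kv rest ih =>
    obtain ⟨n, ds⟩ := kv
    have hnd : ds.Nodup := hpre (n, ds) List.mem_cons_self
    have ih' := ih (fun kv' h => hpre kv' (List.mem_cons_of_mem _ h))
    simp only [pvEdges, List.flatMap_cons, List.filter_append, List.map_append] at *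
    rw [ih', pv_head_part ds n dep hnd, List.filter_cons]
    cases hc : (ds.contains dep && n != dep) <;> simp [hc]

-- pvLoopB's value does not depend on the proof arguments; congruence in the list argument
theorem pvLoopB_congr (rev : PySem.Dict String (List String)) (E : List String)
    (ns ns' : List String) (V : List String) (hns : ns = ns')
    (h : ∀ x ∈ ns, x ∈ E) (h' : ∀ x ∈ ns', x ∈ E)
    (hrev : ∀ c x, x ∈ rev.getD c [] → x ∈ E) :
    pvLoopB rev E ns V h hrev = pvLoopB rev E ns' V h' hrev := by
  subst hns; rfl

-- the two loops agree, by strong induction on the number of unvisited keys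
theorem pv_loops_eq (tds : List (String × List String))
    (hpre : ∀ kv ∈ tds, kv.2.Nodup) :
    ∀ (k : Nat) (V : List String), (tds.filter (fun kv => !V.contains kv.1)).length ≤ k →
    ∀ (dep : String) (rem : List (String × List String)) (hrem : ∀ kv ∈ rem, kv ∈ tds)
      (h2 : ∀ x ∈ (rem.filter (fun kv => kv.2.contains dep && kv.1 != dep)).map (·.1), x ∈ (pvEdges tds).map (·.2))
      (hrev : ∀ c x, x ∈ (pvRev (pvEdges tds)).getD c [] → x ∈ (pvEdges tds).map (·.2)),
      pvLoopA tds rem dep V hrem =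
      pvLoopB (pvRev (pvEdges tds)) ((pvEdges tds).map (·.2))
        ((rem.filter (fun kv => kv.2.contains dep && kv.1 != dep)).map (·.1)) V h2 hrev := by
  intro k
  induction k using Nat.strong_induction_on with
  | _ k ihk =>
  intro V hV dep rem
  induction rem with
  | nil =>
    intro hrem h2 hrev
    rw [pvLoopA, pvLoopB_congr _ _ _ [] _ (by simp) _ (by simp) _, pvLoopB]
  | cons kv rest ihrem =>
    obtain ⟨n, ds⟩ := kv
    intro hrem h2 hrev
    rw [pvLoopA]
    cases hc : (ds.contains dep && n != dep) with
    | false =>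
      have hns : ((((n, ds) :: rest).filter (fun kv => kv.2.contains dep && kv.1 != dep)).map (·.1))
          = ((rest.filter (fun kv => kv.2.contains dep && kv.1 != dep)).map (·.1)) := by
        rw [List.filter_cons_of_neg (by exact ne_true_of_eq_false hc)]
      rw [pvLoopB_congr _ _ _ _ _ hns h2 (fun x hx => h2 x (by rw [hns]; exact hx)) hrev]
      simp only [hc, if_neg Bool.false_ne_true, zero_add]
      exact ihrem _ _ _
    | true =>
      have hns : ((((n, ds) :: rest).filter (fun kv => kv.2.contains dep && kv.1 != dep)).map (·.1))
          = n :: ((rest.filter (fun kv => kv.2.contains dep && kv.1 != dep)).map (·.1)) := by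
        rw [List.filter_cons_of_pos (by exact hc), List.map_cons]
      rw [pvLoopB_congr _ _ _ _ _ hns h2 (fun x hx => h2 x (by rw [hns]; exact hx)) hrev]
      rw [pvLoopB]
      rw [if_pos rfl]
      have htail := ihrem (fun kv h => hrem kv (List.mem_cons_of_mem _ h))
        (fun x hx => h2 x (by rw [hns]; exact List.mem_cons_of_mem _ hx)) hrev
      rw [htail]
      congr 1
      congr 1
      by_cases hv : V.contains n = true
      · rw [dif_pos hv, dif_pos hv]
      · rw [dif_neg hv, dif_neg hv]
        have hmem : (n, ds) ∈ tds := hrem (n, ds) List.mem_cons_self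
        have hlt : ((tds.filter (fun kv => !(n :: V).contains kv.1)).length) <
            ((tds.filter (fun kv => !V.contains kv.1)).length) := by
          refine pv_length_filter_lt tds _ _ ?_ (n, ds) hmem ?_ ?_
          · intro y hq
            simp only [Bool.not_eq_true', List.contains_cons, Bool.or_eq_false_iff] at hq
            simpa using hq.2
          · simpa using hv
          · simp
        have hcross := ihk ((tds.filter (fun kv => !(n :: V).contains kv.1)).length)
          (lt_of_lt_of_le hlt hV) (n :: V) le_rfl n tds (fun _ h => h)
          (fun x hx => pv_mem_rev_getD (pvEdges tds) n x (by rw [pv_rev_getD_eq tds hpre n]; exact hx))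
          hrev
        rw [hcross]
        exact pvLoopB_congr _ _ _ _ _ (by rw [pv_rev_getD_eq tds hpre n]) _ _ _

-- ===== VERDICT (by name: the statement is the Claim_ definition above) =====
theorem calculate_path_criticality_spec : Claim_equal_calculate_path_criticality := by
  intro dependency tds visited _ hpre
  unfold Spec_calculate_path_criticality
  unfold calculate_path_criticality calculate_path_criticality_alt
  by_cases hc : (visited.getD []).contains dependency = true
  · rw [if_pos hc, if_pos hc]
  · rw [if_neg hc, if_neg hc]
    rw [pv_loops_eq tds hpre
      ((tds.filter (fun kv => !(dependency :: visited.getD []).contains kv.1)).length)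
      (dependency :: visited.getD []) le_rfl dependency tds (fun _ h => h)
      (fun x hx => pv_mem_rev_getD (pvEdges tds) dependency x (by rw [pv_rev_getD_eq tds hpre dependency]; exact hx))
      (fun c x hx => pv_mem_rev_getD (pvEdges tds) c x hx)]
    exact pvLoopB_congr _ _ _ _ _ (by rw [pv_rev_getD_eq tds hpre dependency]) _ _ _
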